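-- pv_equiv track=rewrite | github.com/S-V-R-S/AoC | adventOfCode/2024/day21-2.py | trad2
-- ===== SOURCE A (Python) =====
-- from itertools import product
--
-- p0 = {
--     "^": (1, 0),
--     "<": (0, 1),
--     ">": (2, 1),
--     "v": (1, 1),
--     "A": (2, 0)
-- }
--
-- trad = {
--    (-1,0) : "<",
--    (0,1) : "v",
--    (1,0) : ">",
--    (0,-1) : "^",
-- }
--
-- def goto2(s, e):
--         path = []
--         start = p0[s]
--         x,y = start
--         dest = p0[e]
--
--         dx = dest[0] - start[0]
--         dy = dest[1] - start[1]
--         liste = ""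
--
--         if (x + dx, y) !=  (0 , 0):
--             if dx > 0:
--                 liste += trad[(1,0)]*abs(dx)
--             if dx < 0:
--                 liste += trad[(-1,0)]*abs(dx)
--             if dy < 0:
--                 liste += trad[(0,-1)]*abs(dy)
--             if dy > 0:
--                 liste += trad[(0,1)]*abs(dy)
--             liste+="A"
--         if liste != "":
--             path.append(liste)
--             liste = ""
--
--         if (x , y + dy) !=  (0 , 0):
--             if dy < 0:
--                 liste += trad[(0,-1)]*abs(dy)
--             if dy > 0:
--                 liste += trad[(0,1)]*abs(dy)
--             if dx > 0:
--                 liste += trad[(1,0)]*abs(dx)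
--             if dx < 0:
--                 liste += trad[(-1,0)]*abs(dx)
--             liste+="A"
--
--         if liste != "":
--             if liste not in path:
--                 path.append(liste)
--
--         return path
--
-- def generation_combinations(dico):
--     values = [dico[key] for key in sorted(dico.keys())]
--     return [''.join(comb) for comb in product(*values)]
--
-- def trad2(poss):
--     total = []
--     start = "A"
--     dico = {}
--     for i, c in enumerate(poss):
--         dico[i] = goto2(start, c)
--         start = c
--
--     total += generation_combinations(dico)
--     taille = min(len(l) for l in total)
--     true = [item for item in total if len(item) == taille]
--
--     return true
-- ===== SOURCE B (Python) =====
-- # Enumerate combinations by integer index: count the binary choice points (steps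
-- # with two move options), then for each index in range(2**m) decode its bits into
-- # per-step choices and emit that sequence directly -- no per-index dict, no
-- # itertools.product, no min/length filter.
--
-- P0 = {"^": (1, 0), "<": (0, 1), ">": (2, 1), "v": (1, 1), "A": (2, 0)}
--
-- def _options(s, e):
--     (sx, sy), (ex, ey) = P0[s], P0[e]
--     dx, dy = ex - sx, ey - sy
--     h = ">" * dx + "<" * -dx
--     v = "^" * -dy + "v" * dy
--     opts = []
--     if (ex, sy) != (0, 0):
--         opts.append(h + v + "A")
--     if (sx, ey) != (0, 0):
--         cand = v + h + "A"
--         if cand not in opts: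
--             opts.append(cand)
--     return opts
--
-- def trad2(poss):
--     opts = []
--     start = "A"
--     for c in poss:
--         opts.append(_options(start, c))
--         start = c
--     m = sum(1 for o in opts if len(o) == 2)
--     out = []
--     for index in range(1 << m):
--         k, r = m, index
--         seq = []
--         for o in opts:
--             if len(o) == 2:
--                 k -= 1
--                 q, r = divmod(r, 1 << k)
--                 seq.append(o[q])
--             else:
--                 seq.append(o[0])
--         out.append("".join(seq))
--     return out
-- ===== Notes on version B (the rewrite author's own statement) =====
-- stated objective: alternative
-- what changed: Replaced A's three-stage pipeline (index-keyed dict of per-step options, itertools.product over the sorted keys, then a min-length filter) with direct index enumeration: count the m steps that have two move options, and for each integer index in range(2**m) decode its binary digits into the per-step choices and emit that sequence; no product expansion and no filter (all combinations share one length).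
import Mathlib
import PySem

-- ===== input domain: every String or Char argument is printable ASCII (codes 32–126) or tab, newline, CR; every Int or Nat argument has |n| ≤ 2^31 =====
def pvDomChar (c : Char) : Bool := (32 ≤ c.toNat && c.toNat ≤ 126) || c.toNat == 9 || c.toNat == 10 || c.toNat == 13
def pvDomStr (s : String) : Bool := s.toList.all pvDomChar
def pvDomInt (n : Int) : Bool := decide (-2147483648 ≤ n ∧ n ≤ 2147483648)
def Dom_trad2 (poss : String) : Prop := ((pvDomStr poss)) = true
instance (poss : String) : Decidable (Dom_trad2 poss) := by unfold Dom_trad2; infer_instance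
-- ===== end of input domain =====

-- B replaces A's dict + itertools.product + min-length filter with direct index
-- enumeration: for each integer in range(2^m) (m = steps with two options) the
-- index's binary digits are decoded into per-step choices; same return value.

-- ===== PORT A =====
-- strings are handled as List Char (PySem convention); String.ofList is applied only to the result list
def p0A : PySem.Dict Char (Int × Int) :=
  ⟨[('^', (1, 0)), ('<', (0, 1)), ('>', (2, 1)), ('v', (1, 1)), ('A', (2, 0))]⟩

def tradA : PySem.Dict (Int × Int) Char :=
  ⟨[((-1, 0), '<'), ((0, 1), 'v'), ((1, 0), '>'), ((0, -1), '^')]⟩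

-- goto2: `p0[s]` / `trad[(…)]` are `getD` with an arbitrary default; Python raises KeyError on a
-- char outside p0's keys, which Pre_trad2 excludes, and trad is only queried at its own keys.
def goto2A (s e : Char) : List (List Char) :=
  let start := p0A.getD s (0, 0)
  let x := start.1
  let y := start.2
  let dest := p0A.getD e (0, 0)
  let dx := dest.1 - start.1
  let dy := dest.2 - start.2
  let liste1 : List Char :=
    if (x + dx, y) ≠ ((0 : Int), (0 : Int)) then
      (if dx > 0 then List.replicate dx.natAbs (tradA.getD (1, 0) ' ') else []) ++
      (if dx < 0 then List.replicate dx.natAbs (tradA.getD (-1, 0) ' ') else []) ++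
      (if dy < 0 then List.replicate dy.natAbs (tradA.getD (0, -1) ' ') else []) ++
      (if dy > 0 then List.replicate dy.natAbs (tradA.getD (0, 1) ' ') else []) ++ ['A']
    else []
  let path1 : List (List Char) := if liste1 ≠ [] then [liste1] else []
  let liste2 : List Char :=
    if (x, y + dy) ≠ ((0 : Int), (0 : Int)) then
      (if dy < 0 then List.replicate dy.natAbs (tradA.getD (0, -1) ' ') else []) ++
      (if dy > 0 then List.replicate dy.natAbs (tradA.getD (0, 1) ' ') else []) ++
      (if dx > 0 then List.replicate dx.natAbs (tradA.getD (1, 0) ' ') else []) ++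
      (if dx < 0 then List.replicate dx.natAbs (tradA.getD (-1, 0) ' ') else []) ++ ['A']
    else []
  if liste2 ≠ [] then (if liste2 ∈ path1 then path1 else path1 ++ [liste2]) else path1

-- itertools.product(*values): last factor varies fastest
def prodA : List (List (List Char)) → List (List (List Char))
  | [] => [[]]
  | l :: ls => l.flatMap (fun x => (prodA ls).map (x :: ·))

def genCombA (dico : PySem.Dict Int (List (List Char))) : List (List Char) :=
  let values := (PySem.List.sorted dico.keys id).map (fun k => dico.getD k [])
  (prodA values).map List.flatten

def trad2 (poss : String) : List String :=
  let st := (PySem.List.enumerate poss.toList).foldl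
      (fun (p : PySem.Dict Int (List (List Char)) × Char) ic =>
        (p.1.insert ic.1 (goto2A p.2 ic.2), ic.2))
      (⟨[]⟩, 'A')
  let total := genCombA st.1
  -- min(len(l) for l in total): `total` is never empty under Pre_trad2, the `none` arm is unreachable
  let taille := match PySem.List.min? (total.map List.length) id with | some t => t | none => 0
  (total.filter (fun item => item.length == taille)).map String.ofList

-- ===== PORT B =====
def p0B : PySem.Dict Char (Int × Int) :=
  ⟨[('^', (1, 0)), ('<', (0, 1)), ('>', (2, 1)), ('v', (1, 1)), ('A', (2, 0))]⟩

-- _options: ">"*dx with Python's clamping of a negative repeat count (Int.toNat)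
def optsB (s e : Char) : List (List Char) :=
  let ps := p0B.getD s (0, 0)
  let pe := p0B.getD e (0, 0)
  let dx := pe.1 - ps.1
  let dy := pe.2 - ps.2
  let h := List.replicate dx.toNat '>' ++ List.replicate (-dx).toNat '<'
  let v := List.replicate (-dy).toNat '^' ++ List.replicate dy.toNat 'v'
  let o1 : List (List Char) := if (pe.1, ps.2) ≠ ((0 : Int), (0 : Int)) then [h ++ v ++ ['A']] else []
  if (ps.1, pe.2) ≠ ((0 : Int), (0 : Int)) then
    (let cand := v ++ h ++ ['A']; if cand ∈ o1 then o1 else o1 ++ [cand])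
  else o1

-- the inner per-index loop of Source B: k bits of budget remain, r is the undecoded rest;
-- o[q] with q always in range is List.getD (Python would raise only out of range, never reached)
def decodeB : List (List (List Char)) → Nat → Nat → List Char
  | [], _, _ => []
  | o :: os, k, r =>
    if o.length == 2 then
      let k' := k - 1
      let q := r / 2 ^ k'
      let r' := r % 2 ^ k'
      o.getD q [] ++ decodeB os k' r'
    else
      o.getD 0 [] ++ decodeB os k r

def trad2_alt (poss : String) : List String :=
  let opts := (poss.toList.foldl
      (fun (p : List (List (List Char)) × Char) c => (p.1 ++ [optsB p.2 c], c))
      ([], 'A')).1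
  let m := (opts.filter (fun o => o.length == 2)).length
  -- range(1 << m): indices are nonnegative, .toNat is exact
  (((PySem.List.pyRange 0 ((2 : Int) ^ m) 1).map
      (fun idx => decodeB opts m idx.toNat))).map String.ofList

-- ===== PRECONDITION & SPEC =====
-- Pre_: exactly the strings over p0's keys; on any other character Python A raises KeyError.
def Pre_trad2 (poss : String) : Prop := (poss.toList.all (fun c => ['^', '<', '>', 'v', 'A'].contains c)) = true
instance (poss : String) : Decidable (Pre_trad2 poss) := by unfold Pre_trad2; infer_instance

def pvWitness_trad2 : String := "<A^"

def Spec_trad2 (poss : String) (out : List String) : Prop := out = trad2_alt poss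
instance (poss : String) (out : List String) : Decidable (Spec_trad2 poss out) := by unfold Spec_trad2; infer_instance

-- ===== CLAIM (what is proved, stated in full; the proofs are below) =====
def Claim_equal_trad2 : Prop := ∀ (poss : String), Dom_trad2 poss → Pre_trad2 poss → Spec_trad2 poss (trad2 poss)

-- ===== LEMMAS AND PROOFS =====

def kList : List Char := ['^', '<', '>', 'v', 'A']

-- the two per-step option functions agree on p0's keys, and each option list has 1 or 2 elements
theorem opts_eq_bool :
    (kList.all fun s => kList.all fun e => goto2A s e == optsB s e) = true := by decide

theorem opts_eq : ∀ s ∈ kList, ∀ e ∈ kList, goto2A s e = optsB s e := by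
  intro s hs e he
  exact eq_of_beq (List.all_eq_true.mp (List.all_eq_true.mp opts_eq_bool s hs) e he)

theorem opts_card_bool :
    (kList.all fun s => kList.all fun e =>
      (goto2A s e).length == 1 || (goto2A s e).length == 2) = true := by decide

theorem opts_card : ∀ s ∈ kList, ∀ e ∈ kList,
    (goto2A s e).length = 1 ∨ (goto2A s e).length = 2 := by
  intro s hs e he
  have := List.all_eq_true.mp (List.all_eq_true.mp opts_card_bool s hs) e he
  rcases Bool.or_eq_true_iff.mp this with h | h
  · exact Or.inl (by exact_mod_cast eq_of_beq h)
  · exact Or.inr (by exact_mod_cast eq_of_beq h)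

theorem opts_len_bool :
    (kList.all fun s => kList.all fun e =>
      (goto2A s e).all fun a => (goto2A s e).all fun b => a.length == b.length) = true := by decide

theorem opts_len : ∀ s ∈ kList, ∀ e ∈ kList, ∀ a ∈ goto2A s e, ∀ b ∈ goto2A s e,
    a.length = b.length := by
  intro s hs e he a ha b hb
  have h1 := List.all_eq_true.mp (List.all_eq_true.mp opts_len_bool s hs) e he
  exact eq_of_beq (List.all_eq_true.mp (List.all_eq_true.mp h1 a ha) b hb)

-- the per-position option lists, in order, with the running start character
def optsList : Char → List Char → List (List (List Char))
  | _, [] => []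
  | st, c :: cs => goto2A st c :: optsList c cs

theorem optsList_good : ∀ (cs : List Char) (st : Char), st ∈ kList → (∀ c ∈ cs, c ∈ kList) →
    ∀ o ∈ optsList st cs, o.length = 1 ∨ o.length = 2 := by
  intro cs
  induction cs with
  | nil => intro st _ _ o ho; simp [optsList] at ho
  | cons c cs ih =>
    intro st hst hmem o ho
    have hc : c ∈ kList := hmem c (by simp)
    simp only [optsList, List.mem_cons] at ho
    rcases ho with rfl | ho
    · exact opts_card st hst c hc
    · exact ih c hc (fun x hx => hmem x (by simp [hx])) o ho

def idxFrom : Int → List (List (List Char)) → List (Int × List (List Char))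
  | _, [] => []
  | m, v :: vs => (m, v) :: idxFrom (m + 1) vs

theorem idxFrom_key_ge : ∀ (L : List (List (List Char))) (m : Int) (p : Int × List (List Char)),
    p ∈ idxFrom m L → m ≤ p.1 := by
  intro L
  induction L with
  | nil => intro m p h; simp [idxFrom] at h
  | cons v vs ih =>
    intro m p h
    simp only [idxFrom, List.mem_cons] at h
    rcases h with h | h
    · simp [h]
    · have := ih (m + 1) p h; omega

theorem idxFrom_keys_pairwise : ∀ (L : List (List (List Char))) (m : Int),
    ((idxFrom m L).map Prod.fst).Pairwise (· < ·) := by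
  intro L
  induction L with
  | nil => intro m; simp [idxFrom]
  | cons v vs ih =>
    intro m
    simp only [idxFrom, List.map_cons, List.pairwise_cons]
    refine ⟨?_, ih (m + 1)⟩
    intro k hk
    simp only [List.mem_map] at hk
    obtain ⟨p, hp, rfl⟩ := hk
    have := idxFrom_key_ge vs (m + 1) p hp
    omega

-- the enumerate-fold builds exactly the indexed option lists
theorem buildA : ∀ (cs : List Char) (st : Char) (d : PySem.Dict Int (List (List Char))) (m : Int),
    (∀ p ∈ d.items, p.1 < m) →
    ((PySem.List.enumerate cs m).foldl
      (fun (p : PySem.Dict Int (List (List Char)) × Char) ic =>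
        (p.1.insert ic.1 (goto2A p.2 ic.2), ic.2)) (d, st)).1.items
      = d.items ++ idxFrom m (optsList st cs) := by
  intro cs
  induction cs with
  | nil => intro st d m _; simp [PySem.List.enumerate, optsList, idxFrom]
  | cons c cs ih =>
    intro st d m hlt
    rw [PySem.List.enumerate_cons]
    simp only [List.foldl_cons]
    have hcon : d.contains m = false := by
      simp only [PySem.Dict.contains, List.any_eq_false]
      intro p hp
      have := hlt p hp
      simp only [beq_iff_eq]
      omega
    have hins : d.insert m (goto2A st c) = ⟨d.items ++ [(m, goto2A st c)]⟩ := by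
      simp [PySem.Dict.insert, hcon]
    rw [hins,
      ih c ⟨d.items ++ [(m, goto2A st c)]⟩ (m + 1)
        (by intro p hp
            simp only [List.mem_append, List.mem_singleton] at hp
            rcases hp with hp | hp
            · have := hlt p hp; omega
            · simp [hp])]
    simp [optsList, idxFrom]

-- looking each key up in the finished dict returns the values in order
theorem getD_idxFrom : ∀ (L : List (List (List Char))) (m : Int),
    ((idxFrom m L).map Prod.fst).map
      (fun k => (PySem.Dict.mk (idxFrom m L)).getD k []) = L := by
  intro L
  induction L with
  | nil => intro m; simp [idxFrom]
  | cons v vs ih =>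
    intro m
    simp only [idxFrom, List.map_cons]
    have hhead : (PySem.Dict.mk ((m, v) :: idxFrom (m + 1) vs)).getD m [] = v := by
      simp [PySem.Dict.getD, PySem.Dict.get?, List.find?]
    have htail : ∀ k ∈ (idxFrom (m + 1) vs).map Prod.fst,
        (PySem.Dict.mk ((m, v) :: idxFrom (m + 1) vs)).getD k []
          = (PySem.Dict.mk (idxFrom (m + 1) vs)).getD k [] := by
      intro k hk
      obtain ⟨p, hp, rfl⟩ := List.mem_map.mp hk
      have hge := idxFrom_key_ge vs (m + 1) p hp
      simp only [PySem.Dict.getD, PySem.Dict.get?]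
      rw [List.find?_cons_of_neg]
      simp only [beq_iff_eq]
      omega
    rw [hhead, List.map_congr_left htail, ih (m + 1)]

-- A's total equals the product over the per-position option lists, joined
theorem totalA_eq : ∀ (poss : String),
    trad2 poss
      = (((prodA (optsList 'A' poss.toList)).map List.flatten).filter
          (fun item => item.length ==
            (match PySem.List.min?
                (((prodA (optsList 'A' poss.toList)).map List.flatten).map List.length) id with
             | some t => t | none => 0))).map String.ofList := by
  intro poss
  have hb := buildA poss.toList 'A' ⟨[]⟩ 0 (by intro p hp; simp at hp)
  show ((genCombA _).filter _).map String.ofList = _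
  have hdict :
      ((PySem.List.enumerate poss.toList).foldl
        (fun (p : PySem.Dict Int (List (List Char)) × Char) ic =>
          (p.1.insert ic.1 (goto2A p.2 ic.2), ic.2)) (⟨[]⟩, 'A')).1
        = PySem.Dict.mk (idxFrom 0 (optsList 'A' poss.toList)) := by
    cases h : ((PySem.List.enumerate poss.toList).foldl
        (fun (p : PySem.Dict Int (List (List Char)) × Char) ic =>
          (p.1.insert ic.1 (goto2A p.2 ic.2), ic.2)) (⟨[]⟩, 'A')).1 with
    | mk items =>
      congr 1
      have := hb
      rw [h] at this
      simpa using this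
  rw [hdict]
  have hgen : genCombA (PySem.Dict.mk (idxFrom 0 (optsList 'A' poss.toList)))
      = (prodA (optsList 'A' poss.toList)).map List.flatten := by
    unfold genCombA
    have hkeys : PySem.Dict.keys (PySem.Dict.mk (idxFrom 0 (optsList 'A' poss.toList)))
        = (idxFrom 0 (optsList 'A' poss.toList)).map Prod.fst := rfl
    rw [hkeys]
    rw [PySem.List.sorted_eq_of_perm_of_pairwise_lt _ _ id (List.Perm.refl _)
      (by simpa using idxFrom_keys_pairwise (optsList 'A' poss.toList) 0)]
    rw [getD_idxFrom]
  rw [hgen]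

-- the product over nonempty option lists is nonempty
theorem prod_ne_nil : ∀ (cs : List Char) (st : Char), st ∈ kList → (∀ c ∈ cs, c ∈ kList) →
    prodA (optsList st cs) ≠ [] := by
  intro cs
  induction cs with
  | nil => intro st _ _; simp [optsList, prodA]
  | cons c cs ih =>
    intro st hst hmem
    have hc : c ∈ kList := hmem c (by simp)
    have h1 : goto2A st c ≠ [] := by
      intro h
      rcases opts_card st hst c hc with h2 | h2 <;> simp [h] at h2
    have h2 := ih c hc (fun x hx => hmem x (by simp [hx]))
    simp only [optsList, prodA, ne_eq, List.flatMap_eq_nil_iff, not_forall]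
    obtain ⟨x, hx⟩ := List.exists_mem_of_ne_nil _ h1
    exact ⟨x, hx, by simp [h2]⟩

-- every combination in the product has the same joined length
theorem prod_len : ∀ (cs : List Char) (st : Char), st ∈ kList → (∀ c ∈ cs, c ∈ kList) →
    ∀ a ∈ prodA (optsList st cs), ∀ b ∈ prodA (optsList st cs),
      a.flatten.length = b.flatten.length := by
  intro cs
  induction cs with
  | nil =>
    intro st _ _ a ha b hb
    simp [optsList, prodA] at ha hb
    simp [ha, hb]
  | cons c cs ih =>
    intro st hst hmem a ha b hb
    have hc : c ∈ kList := hmem c (by simp)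
    simp only [optsList, prodA, List.mem_flatMap, List.mem_map] at ha hb
    obtain ⟨x, hx, t, ht, rfl⟩ := ha
    obtain ⟨y, hy, u, hu, rfl⟩ := hb
    have hxy := opts_len st hst c hc x hx y hy
    have htu := ih c hc (fun z hz => hmem z (by simp [hz])) t ht u hu
    simp [List.flatten_cons, hxy, htu]

-- PySem.List.min? of a nonempty Nat list is some element of it
def minStep (acc : Option Nat) (x : Nat) : Option Nat :=
  match acc with
  | none => some x
  | some m => if x < m then some x else some m

theorem min?_eq_foldl_minStep (l : List Nat) : PySem.List.min? l id = l.foldl minStep none := by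
  unfold PySem.List.min?
  congr 1
  funext acc x
  cases acc <;> simp [minStep]

theorem minStep_foldl_mem : ∀ (l : List Nat) (acc : Option Nat) (m : Nat),
    l.foldl minStep acc = some m → m ∈ l ∨ acc = some m := by
  intro l
  induction l with
  | nil => intro acc m h; simp at h; simp [h]
  | cons x xs ih =>
    intro acc m h
    simp only [List.foldl_cons] at h
    rcases ih _ m h with hm | hm
    · exact Or.inl (by simp [hm])
    · cases acc with
      | none => simp [minStep] at hm; exact Or.inl (by simp [hm])
      | some mm =>
        simp only [minStep] at hm
        split at hm
        · exact Or.inl (by simp_all)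
        · exact Or.inr hm

theorem minStep_isSome : ∀ (l : List Nat) (acc : Nat),
    ∃ m, l.foldl minStep (some acc) = some m := by
  intro l
  induction l with
  | nil => intro acc; exact ⟨acc, rfl⟩
  | cons x xs ih =>
    intro acc
    simp only [List.foldl_cons, minStep]
    split
    · exact ih x
    · exact ih acc

-- on a nonempty list of equal-length strings, the min-length filter is the identity
theorem filter_min_eq_self : ∀ (T : List (List Char)), T ≠ [] →
    (∀ a ∈ T, ∀ b ∈ T, a.length = b.length) →
    T.filter (fun item => item.length ==
      (match PySem.List.min? (T.map List.length) id with | some t => t | none => 0)) = T := by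
  intro T hne hlen
  cases T with
  | nil => exact absurd rfl hne
  | cons a T =>
    have hsome : ∃ m, PySem.List.min? ((a :: T).map List.length) id = some m := by
      rw [min?_eq_foldl_minStep]
      simp only [List.map_cons, List.foldl_cons, minStep]
      exact minStep_isSome (T.map List.length) a.length
    obtain ⟨m, hm⟩ := hsome
    have hmem : m ∈ (a :: T).map List.length := by
      rw [min?_eq_foldl_minStep] at hm
      rcases minStep_foldl_mem ((a :: T).map List.length) none m hm with h | h
      · exact h
      · simp at h
    obtain ⟨b, hb, hbm⟩ := List.mem_map.mp hmem
    rw [hm]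
    rw [List.filter_eq_self]
    intro x hx
    simp only [beq_iff_eq]
    rw [← hbm]
    exact hlen x hx b hb

-- ===== B-side lemmas =====

-- B's option-building fold yields the same per-position option lists as A's
theorem buildB : ∀ (cs : List Char) (st : Char) (acc : List (List (List Char))),
    st ∈ kList → (∀ c ∈ cs, c ∈ kList) →
    (cs.foldl (fun (p : List (List (List Char)) × Char) c => (p.1 ++ [optsB p.2 c], c))
      (acc, st)).1 = acc ++ optsList st cs := by
  intro cs
  induction cs with
  | nil => intro st acc _ _; simp [optsList]
  | cons c cs ih =>
    intro st acc hst hmem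
    have hc : c ∈ kList := hmem c (by simp)
    simp only [List.foldl_cons]
    rw [ih c (acc ++ [optsB st c]) hc (fun x hx => hmem x (by simp [hx]))]
    rw [← opts_eq st hst c hc]
    simp [optsList]

def c2 (L : List (List (List Char))) : Nat := (L.filter (fun o => o.length == 2)).length

-- decoding every index in range(2^m) yields exactly the product, joined, in product order
theorem decode_range_eq : ∀ (L : List (List (List Char))),
    (∀ o ∈ L, o.length = 1 ∨ o.length = 2) →
    (List.range (2 ^ c2 L)).map (fun r => decodeB L (c2 L) r)
      = (prodA L).map List.flatten := by
  intro L
  induction L with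
  | nil =>
    intro _
    simp [c2, prodA, decodeB]
  | cons o os ih =>
    intro hgood
    have hos := fun x hx => hgood x (List.mem_cons_of_mem o hx)
    rcases hgood o (by simp) with h1 | h2
    · -- singleton head: o = [a]
      obtain ⟨a, rfl⟩ := List.length_eq_one_iff.mp h1
      have hc2 : c2 ([a] :: os) = c2 os := by simp [c2]
      rw [hc2]
      have hdec : ∀ r, decodeB ([a] :: os) (c2 os) r = a ++ decodeB os (c2 os) r := by
        intro r; simp [decodeB]
      calc (List.range (2 ^ c2 os)).map (fun r => decodeB ([a] :: os) (c2 os) r)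
          = (List.range (2 ^ c2 os)).map (fun r => a ++ decodeB os (c2 os) r) := by
            exact List.map_congr_left (fun r _ => hdec r)
        _ = ((List.range (2 ^ c2 os)).map (fun r => decodeB os (c2 os) r)).map (a ++ ·) := by
            simp [List.map_map, Function.comp_def]
        _ = ((prodA os).map List.flatten).map (a ++ ·) := by rw [ih hos]
        _ = (prodA ([a] :: os)).map List.flatten := by
            simp [prodA, List.map_map, Function.comp_def, List.flatten_cons]
    · -- two-option head: o = [a, b]
      obtain ⟨a, t, rfl⟩ := List.exists_cons_of_length_eq_add_one h2
      obtain ⟨b, u, rfl⟩ := List.exists_cons_of_length_eq_add_one (by simpa using h2)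
      obtain rfl : u = [] := by simpa using h2
      have hc2 : c2 ((a :: b :: []) :: os) = c2 os + 1 := by simp [c2]
      rw [hc2]
      have hpow : 2 ^ (c2 os + 1) = 2 ^ c2 os + 2 ^ c2 os := by ring
      have hdec0 : ∀ r < 2 ^ c2 os,
          decodeB ((a :: b :: []) :: os) (c2 os + 1) r = a ++ decodeB os (c2 os) r := by
        intro r hr
        simp only [decodeB, List.length_cons, List.length_nil]
        rw [if_pos (by decide)]
        simp only [Nat.add_sub_cancel]
        rw [Nat.div_eq_of_lt hr, Nat.mod_eq_of_lt hr]
        simp [List.getD]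
      have hdec1 : ∀ s < 2 ^ c2 os,
          decodeB ((a :: b :: []) :: os) (c2 os + 1) (2 ^ c2 os + s)
            = b ++ decodeB os (c2 os) s := by
        intro s hs
        simp only [decodeB, List.length_cons, List.length_nil]
        rw [if_pos (by decide)]
        simp only [Nat.add_sub_cancel]
        have hq : (2 ^ c2 os + s) / 2 ^ c2 os = 1 := by
          rw [Nat.add_comm, Nat.add_div_right _ (Nat.two_pow_pos _),
            Nat.div_eq_of_lt hs]
        have hr : (2 ^ c2 os + s) % 2 ^ c2 os = s := by
          rw [Nat.add_comm, Nat.add_mod_right, Nat.mod_eq_of_lt hs]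
        rw [hq, hr]
        simp [List.getD]
      rw [hpow, List.range_add]
      rw [List.map_append, List.map_map]
      have hfst : (List.range (2 ^ c2 os)).map
            (fun r => decodeB ((a :: b :: []) :: os) (c2 os + 1) r)
          = ((prodA os).map List.flatten).map (a ++ ·) := by
        rw [List.map_congr_left (fun r hr => hdec0 r (List.mem_range.mp hr)), ← ih hos]
        simp [List.map_map, Function.comp_def]
      have hsnd : (List.range (2 ^ c2 os)).map
            ((fun r => decodeB ((a :: b :: []) :: os) (c2 os + 1) r) ∘ (2 ^ c2 os + ·))
          = ((prodA os).map List.flatten).map (b ++ ·) := by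
        rw [List.map_congr_left
          (fun s hs => by
            show decodeB _ _ (2 ^ c2 os + s) = _
            exact hdec1 s (List.mem_range.mp hs)), ← ih hos]
        simp [List.map_map, Function.comp_def]
      rw [hfst, hsnd]
      simp [prodA, List.map_map, Function.comp_def, List.flatten_cons]

-- ===== VERDICT (by name: the statement is the Claim_ definition above) =====
theorem trad2_spec : Claim_equal_trad2 := by
  intro poss _ hpre
  unfold Spec_trad2
  rw [totalA_eq]
  have hA : ('A' : Char) ∈ kList := by decide
  have hmem : ∀ c ∈ poss.toList, c ∈ kList := by
    intro c hc
    have := List.all_eq_true.mp hpre c hc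
    simpa [kList] using this
  rw [filter_min_eq_self _
    (by simpa using prod_ne_nil poss.toList 'A' hA hmem)
    (by intro a ha b hb
        simp only [List.mem_map] at ha hb
        obtain ⟨a', ha', rfl⟩ := ha
        obtain ⟨b', hb', rfl⟩ := hb
        exact prod_len poss.toList 'A' hA hmem a' ha' b' hb')]
  unfold trad2_alt
  rw [buildB poss.toList 'A' [] hA hmem]
  simp only [List.nil_append]
  have hrange : PySem.List.pyRange 0 ((2 : Int) ^ c2 (optsList 'A' poss.toList)) 1
      = (List.range (2 ^ c2 (optsList 'A' poss.toList))).map (fun k : Nat => (k : Int)) := by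
    have h1 : ((2 : Int) ^ c2 (optsList 'A' poss.toList) - 0)
        = ((2 ^ c2 (optsList 'A' poss.toList) : Nat) : Int) := by push_cast; ring
    rw [PySem.List.pyRange_one, h1, Int.toNat_natCast]
    exact List.map_congr_left (fun k _ => by simp)
  show _ = (((PySem.List.pyRange 0 ((2:Int) ^ c2 (optsList 'A' poss.toList)) 1).map
      (fun idx => decodeB (optsList 'A' poss.toList) (c2 (optsList 'A' poss.toList)) idx.toNat))).map String.ofList
  congr 1
  rw [hrange, List.map_map, ← decode_range_eq _ (optsList_good poss.toList 'A' hA hmem)]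
  exact List.map_congr_left (fun r _ => by simp)
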